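-- pv_equiv track=rewrite | github.com/codevbv/Information-retreival-CS60092 | 20CS60R57_A1/ASSIGNMENT1_20CS60R57_2.py | get_qa
-- ===== SOURCE A (Python) =====
-- def get_qa(text,my_participants,last_index):
-- 	qa = "Question-and-Answer Session"
-- 	i = last_index+1
-- 	serial = 0
-- 	my_dict = {}
-- 	while(i<len(text)):
-- 		speaker = None
-- 		remark = ""
-- 		for mp in my_participants:
-- 			if text[i].find(mp) > -1 and len(text[i]) < len(mp)+10:
-- 				speaker = mp
-- 				break
--
-- 		if speaker is not None:
-- 			i += 1
-- 			flag = True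
-- 			while(flag):
-- 				for mp in my_participants:
-- 					if i>=len(text) or (text[i].find(mp) > -1 and len(text[i]) < len(mp)+10):
-- 						i -= 1
-- 						flag = False
-- 						break
-- 				if flag==False:
-- 					break
-- 				remark += text[i]
-- 				i += 1
-- 		else:
-- 			i+=1
-- 			continue
--
-- 		my_dict[serial] = {}
-- 		my_dict[serial]["speaker"] = speaker
-- 		my_dict[serial]["remark"] = remark
-- 		serial +=1
-- 		i += 1
--
-- 	return my_dict
-- ===== SOURCE B (Python) =====
-- def get_qa(text, my_participants, last_index):
--     def match_speaker(line):
--         for mp in my_participants: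
--             if line.find(mp) > -1 and len(line) < len(mp) + 10:
--                 return mp
--         return None
--
--     my_dict = {}
--     serial = 0
--     speaker = None
--     remark = ""
--     for line in text[last_index + 1:]:
--         mp = match_speaker(line)
--         if mp is not None:
--             if speaker is not None:
--                 my_dict[serial] = {"speaker": speaker, "remark": remark}
--                 serial += 1
--             speaker = mp
--             remark = ""
--         elif speaker is not None:
--             remark += line
--     if speaker is not None:
--         my_dict[serial] = {"speaker": speaker, "remark": remark}
--     return my_dict
-- ===== Notes on version B (the rewrite author's own statement) =====
-- stated objective: simpler
-- what changed: Replaced A's nested while loops with index arithmetic (i += 1 / i -= 1 backup and a flag) by a single state-machine pass over text[last_index+1:] that keeps a current speaker and pending remark and flushes on the next speaker line and at the end.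
import Mathlib
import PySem

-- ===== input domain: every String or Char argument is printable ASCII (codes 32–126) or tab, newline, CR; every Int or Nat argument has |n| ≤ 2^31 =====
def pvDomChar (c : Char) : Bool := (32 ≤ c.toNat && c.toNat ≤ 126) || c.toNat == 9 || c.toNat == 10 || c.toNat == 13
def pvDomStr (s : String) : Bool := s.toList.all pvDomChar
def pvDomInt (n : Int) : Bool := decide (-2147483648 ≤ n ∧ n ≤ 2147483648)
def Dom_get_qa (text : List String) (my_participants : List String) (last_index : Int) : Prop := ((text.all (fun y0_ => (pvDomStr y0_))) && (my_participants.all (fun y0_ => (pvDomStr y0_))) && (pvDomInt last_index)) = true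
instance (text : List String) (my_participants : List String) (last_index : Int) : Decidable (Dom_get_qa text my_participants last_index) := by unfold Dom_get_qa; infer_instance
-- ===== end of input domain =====

-- B replaces A's nested while loops (index arithmetic with i -= 1 backup and a flag) by one
-- state-machine pass over text[last_index+1:] holding the current speaker and pending remark (objective: simpler).

-- ===== PORT A =====

-- A's inner 'for mp in my_participants' match loop (first participant found in a short-enough line)
def pvFindSpA (mps : List String) (line : String) : Option String :=
  match mps with
  | [] => none
  | mp :: rest =>
      if PySem.Str.find line mp > -1 ∧ (PySem.Str.len line : Int) < PySem.Str.len mp + 10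
      then some mp else pvFindSpA rest line

-- my_dict[serial] = {}; ["speaker"] = sp; ["remark"] = rm
def pvEntryA (sp rm : String) : PySem.Dict String String :=
  ((PySem.Dict.empty).insert "speaker" sp).insert "remark" rm

-- A's inner while(flag) loop: accumulate remark until end of text or a speaker line, then step i back.
-- Fuel-based; the fuel passed at each call site suffices for every call A makes (mps ≠ [] there, so the stop test fires).
def pvInnerA (text mps : List String) : Nat → Int → String → Int × String
  | 0, i, rm => (i - 1, rm)
  | f + 1, i, rm =>
      if mps ≠ [] ∧ ((text.length : Int) ≤ i ∨ (pvFindSpA mps ((PySem.List.pyGet? text i).getD "")).isSome)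
      then (i - 1, rm)
      else
        match PySem.List.pyGet? text i with
        | some line => pvInnerA text mps f (i + 1) (rm ++ line)
        | none => (i - 1, rm)   -- Python raises IndexError here; unreachable from pvOuterA (there mps ≠ [])

-- A's outer while(i<len(text)) loop
def pvOuterA (text mps : List String) : Nat → Int → Int → PySem.Dict Int (PySem.Dict String String) → PySem.Dict Int (PySem.Dict String String)
  | 0, _, _, d => d
  | f + 1, i, s, d =>
      if i < (text.length : Int) then
        match pvFindSpA mps ((PySem.List.pyGet? text i).getD "") with
        | none => pvOuterA text mps f (i + 1) s d
        | some sp =>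
            let p := pvInnerA text mps (2 * text.length + 1) (i + 1) ""
            pvOuterA text mps f (p.1 + 1) (s + 1) (d.insert s (pvEntryA sp p.2))
      else d

def get_qa (text : List String) (my_participants : List String) (last_index : Int) : List (Int × List (String × String)) :=
  (pvOuterA text my_participants (text.length + (last_index + 1).natAbs) (last_index + 1) 0 PySem.Dict.empty).items.map
    (fun p => (p.1, p.2.items))

-- ===== PORT B =====

-- B's match_speaker helper
def pvMatchB (mps : List String) (line : String) : Option String :=
  match mps with
  | [] => none
  | mp :: rest =>
      if PySem.Str.find line mp > -1 ∧ (PySem.Str.len line : Int) < PySem.Str.len mp + 10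
      then some mp else pvMatchB rest line

-- B's loop body: state = (my_dict, serial, speaker, remark)
def pvStepB (mps : List String)
    (st : PySem.Dict Int (PySem.Dict String String) × Int × Option String × String)
    (line : String) : PySem.Dict Int (PySem.Dict String String) × Int × Option String × String :=
  match pvMatchB mps line, st with
  | some mp, (d, s, some sp, rm) =>
      (d.insert s (PySem.Dict.ofList [("speaker", sp), ("remark", rm)]), s + 1, some mp, "")
  | some mp, (d, s, none, _) => (d, s, some mp, "")
  | none, (d, s, some sp, rm) => (d, s, some sp, rm ++ line)
  | none, st' => st'

-- B's final flush after the loop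
def pvFinB (st : PySem.Dict Int (PySem.Dict String String) × Int × Option String × String) : PySem.Dict Int (PySem.Dict String String) :=
  match st with
  | (d, s, some sp, rm) => d.insert s (PySem.Dict.ofList [("speaker", sp), ("remark", rm)])
  | (d, _, none, _) => d

def get_qa_alt (text : List String) (my_participants : List String) (last_index : Int) : List (Int × List (String × String)) :=
  (pvFinB ((PySem.List.slice text (some (last_index + 1)) none).foldl (pvStepB my_participants)
      (PySem.Dict.empty, 0, none, ""))).items.map (fun p => (p.1, p.2.items))

-- ===== PRECONDITION & SPEC =====
-- Pre_ restricts to the natural domain last_index ≥ -1 (start position inside or at the front of the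
-- transcript): for last_index < -1 Python either raises IndexError (last_index+1 < -len(text)) or starts
-- reading via negative-index wraparound, re-scanning lines B's slice skips.
def Pre_get_qa (text : List String) (my_participants : List String) (last_index : Int) : Prop := -1 ≤ last_index
instance (text : List String) (my_participants : List String) (last_index : Int) : Decidable (Pre_get_qa text my_participants last_index) := by unfold Pre_get_qa; infer_instance

def pvWitness_get_qa : List String × List String × Int :=
  (["Alice", "hello there my friend, a long line", "Bob", "hi"], ["Alice", "Bob"], -1)

def Spec_get_qa (text : List String) (my_participants : List String) (last_index : Int) (out : List (Int × List (String × String))) : Prop := out = get_qa_alt text my_participants last_index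
instance (text : List String) (my_participants : List String) (last_index : Int) (out : List (Int × List (String × String))) : Decidable (Spec_get_qa text my_participants last_index out) := by unfold Spec_get_qa; infer_instance

-- ===== CLAIM (what is proved, stated in full; the proofs are below) =====
def Claim_equal_get_qa : Prop := ∀ (text : List String) (my_participants : List String) (last_index : Int), Dom_get_qa text my_participants last_index → Pre_get_qa text my_participants last_index → Spec_get_qa text my_participants last_index (get_qa text my_participants last_index)

-- ===== LEMMAS AND PROOFS =====

theorem pvMatchB_eq (mps : List String) (line : String) : pvMatchB mps line = pvFindSpA mps line := by
  induction mps with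
  | nil => rfl
  | cons mp rest ih => simp only [pvMatchB, pvFindSpA, ih]

theorem pvEntryA_eq (sp rm : String) :
    PySem.Dict.ofList [("speaker", sp), ("remark", rm)] = pvEntryA sp rm := by
  rfl

theorem pvInnerA_fst_ge (text mps : List String) (f : Nat) (i : Int) (rm : String) :
    i - 1 ≤ (pvInnerA text mps f i rm).1 := by
  induction f generalizing i rm with
  | zero => simp [pvInnerA]
  | succ f ih =>
      simp only [pvInnerA]
      split
      · simp
      · split
        · exact le_trans (by omega) (le_trans (by omega : i + 1 - 1 - 1 ≤ i + 1 - 1) (ih (i+1) _))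
        · simp

theorem pyGet_nat (text : List String) (n : Nat) (h : n < text.length) :
    PySem.List.pyGet? text (n : Int) = some (text[n]'h) := by
  rw [PySem.List.pyGet?_natCast]
  exact List.getElem?_eq_getElem h

theorem inner_fold (text mps : List String) (hm : mps ≠ [])
    (d : PySem.Dict Int (PySem.Dict String String)) (s : Int) (sp : String) :
    ∀ (f : Nat) (j : Int) (rm : String),
    0 ≤ j → (text.length : Int) ≤ f + j →
    pvFinB (List.foldl (pvStepB mps) (d, s, some sp, rm) (text.drop j.toNat)) =
    pvFinB (List.foldl (pvStepB mps)
      (d.insert s (pvEntryA sp (pvInnerA text mps f j rm).2), s + 1, none, "")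
      (text.drop ((pvInnerA text mps f j rm).1 + 1).toNat)) := by
  intro f
  induction f with
  | zero =>
      intro j rm h0 hlen
      obtain ⟨n, rfl⟩ : ∃ n : Nat, j = (n : Int) := ⟨j.toNat, by omega⟩
      have hd : text.drop ((n : Int)).toNat = [] := List.drop_eq_nil_of_le (by omega)
      have he : ((n : Int) - 1 + 1).toNat = ((n : Int)).toNat := by omega
      simp only [pvInnerA, he, hd, List.foldl_nil, pvFinB, pvEntryA_eq]
  | succ f ih =>
      intro j rm h0 hlen
      obtain ⟨n, rfl⟩ : ∃ n : Nat, j = (n : Int) := ⟨j.toNat, by omega⟩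
      by_cases hc : mps ≠ [] ∧ ((text.length : Int) ≤ (n : Int) ∨ (pvFindSpA mps ((PySem.List.pyGet? text (n : Int)).getD "")).isSome)
      · -- stop: end of text or a speaker line; pvInnerA returns (j-1, rm)
        rw [pvInnerA, if_pos hc]
        have he : ((n : Int) - 1 + 1).toNat = n := by omega
        by_cases hn : n < text.length
        case neg =>
          have hd : text.drop n = [] := List.drop_eq_nil_of_le (by omega)
          simp only [he, Int.toNat_natCast, hd, List.foldl_nil, pvFinB, pvEntryA_eq]
        case pos =>
          have hsp : (pvFindSpA mps ((PySem.List.pyGet? text (n : Int)).getD "")).isSome := by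
            rcases hc.2 with hend | hsp
            · omega
            · exact hsp
          rw [pyGet_nat text n hn] at hsp
          obtain ⟨sp', hsp'⟩ := Option.isSome_iff_exists.mp hsp
          have hdrop := List.drop_eq_getElem_cons (l := text) hn
          simp only [he, Int.toNat_natCast, hdrop, List.foldl_cons]
          have hmB : pvMatchB mps (text[n]'hn) = some sp' := by rw [pvMatchB_eq]; simpa using hsp'
          simp only [pvStepB, hmB, pvEntryA_eq]
      · -- continue: accumulate the line
        rw [pvInnerA, if_neg hc]
        push_neg at hc
        have hc' := hc hm
        have hn : n < text.length := by
          have := hc'.1; omega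
        rw [pyGet_nat text n hn]
        have hmB : pvMatchB mps (text[n]'hn) = none := by
          rw [pvMatchB_eq]
          have := hc'.2
          rw [pyGet_nat text n hn] at this
          simpa [Option.isSome_iff_exists] using (by simpa using this)
        have hdrop := List.drop_eq_getElem_cons (l := text) hn
        have hstep : ((n : Int) + 1).toNat = n + 1 := by omega
        have hIH := ih ((n : Int) + 1) (rm ++ text[n]'hn) (by omega) (by push_cast; push_cast at hlen; omega)
        simp only [Int.toNat_natCast, hdrop, List.foldl_cons, pvStepB, hmB]
        simp only [hstep] at hIH
        exact hIH

theorem outer_fold (text mps : List String) :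
    ∀ (f : Nat) (i : Int) (s : Int) (d : PySem.Dict Int (PySem.Dict String String)),
    0 ≤ i → (text.length : Int) ≤ f + i →
    pvOuterA text mps f i s d =
    pvFinB (List.foldl (pvStepB mps) (d, s, none, "") (text.drop i.toNat)) := by
  intro f
  induction f with
  | zero =>
      intro i s d h0 hlen
      have hd : text.drop i.toNat = [] := List.drop_eq_nil_of_le (by omega)
      simp only [pvOuterA, hd, List.foldl_nil, pvFinB]
  | succ f ih =>
      intro i s d h0 hlen
      obtain ⟨n, rfl⟩ : ∃ n : Nat, i = (n : Int) := ⟨i.toNat, by omega⟩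
      by_cases hn : (n : Int) < (text.length : Int)
      · have hnn : n < text.length := by exact_mod_cast hn
        have hdrop := List.drop_eq_getElem_cons (l := text) hnn
        have hget : (PySem.List.pyGet? text (n : Int)).getD "" = text[n]'hnn := by
          rw [pyGet_nat text n hnn]; rfl
        have hstep : ((n : Int) + 1).toNat = n + 1 := by omega
        rw [pvOuterA, if_pos hn, hget]
        cases hsp : pvFindSpA mps (text[n]'hnn) with
        | none =>
            have hmB : pvMatchB mps (text[n]'hnn) = none := by rw [pvMatchB_eq, hsp]
            have hIH := ih ((n : Int) + 1) s d (by omega) (by push_cast; push_cast at hlen; omega)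
            simp only [Int.toNat_natCast, hdrop, List.foldl_cons, pvStepB, hmB]
            simp only [hstep] at hIH
            exact hIH
        | some sp =>
            have hm : mps ≠ [] := by
              intro h; rw [h] at hsp; simp [pvFindSpA] at hsp
            have hmB : pvMatchB mps (text[n]'hnn) = some sp := by rw [pvMatchB_eq, hsp]
            have hge := pvInnerA_fst_ge text mps (2 * text.length + 1) ((n : Int) + 1) ""
            have hinner := inner_fold text mps hm d s sp (2 * text.length + 1) ((n : Int) + 1) ""
              (by omega) (by push_cast; push_cast at hlen; omega)
            have hIH := ih ((pvInnerA text mps (2 * text.length + 1) ((n : Int) + 1) "").1 + 1) (s + 1)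
              (d.insert s (pvEntryA sp (pvInnerA text mps (2 * text.length + 1) ((n : Int) + 1) "").2))
              (by omega) (by push_cast at hlen ⊢; omega)
            show pvOuterA text mps f ((pvInnerA text mps (2 * text.length + 1) ((n : Int) + 1) "").1 + 1) (s + 1)
                (d.insert s (pvEntryA sp (pvInnerA text mps (2 * text.length + 1) ((n : Int) + 1) "").2)) =
              pvFinB (List.foldl (pvStepB mps) (d, s, none, "") (List.drop ((n : Int)).toNat text))
            rw [hIH, ← hinner]
            simp only [hstep, Int.toNat_natCast, hdrop, List.foldl_cons, pvStepB, hmB]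
      · have hd : text.drop ((n : Int)).toNat = [] := List.drop_eq_nil_of_le (by omega)
        rw [pvOuterA, if_neg hn]
        simp only [hd, List.foldl_nil, pvFinB]

-- ===== VERDICT (by name: the statement is the Claim_ definition above) =====
theorem get_qa_spec : Claim_equal_get_qa := by
  intro text mps last_index _ hpre
  unfold Spec_get_qa get_qa get_qa_alt
  have h0 : 0 ≤ last_index + 1 := by exact_mod_cast (by omega : (-1:Int) ≤ last_index → 0 ≤ last_index + 1) hpre
  rw [PySem.List.slice_from text h0]
  rw [outer_fold text mps (text.length + (last_index + 1).natAbs) (last_index + 1) 0 PySem.Dict.empty h0 (by omega)]
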